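-- pv_equiv track=rewrite | github.com/jaredap1995/LeetCode | Python/Easy/strings/makeTheStringGreatAgain.py | solution
-- ===== SOURCE A (Python) =====
-- def solution(s):
--     stack = []
--     for i in range(len(s)):
--         if stack and abs(ord(s[i]) - ord(stack[-1])) == 32:
--             stack.pop()
--         else:
--             stack.append(s[i])
--
--     return ''.join(stack)
-- ===== SOURCE B (Python) =====
-- def solution(s):
--     while True:
--         for i in range(len(s) - 1):
--             if abs(ord(s[i]) - ord(s[i + 1])) == 32:
--                 s = s[:i] + s[i + 2:]
--                 break
--         else:
--             return s
-- ===== Notes on version B (the rewrite author's own statement) =====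
-- stated objective: alternative
-- what changed: Replaced the single-pass stack elimination with repeated leftmost-pair removal: scan for the first adjacent pair differing by 32, delete it, and restart until no pair remains.
import Mathlib
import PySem

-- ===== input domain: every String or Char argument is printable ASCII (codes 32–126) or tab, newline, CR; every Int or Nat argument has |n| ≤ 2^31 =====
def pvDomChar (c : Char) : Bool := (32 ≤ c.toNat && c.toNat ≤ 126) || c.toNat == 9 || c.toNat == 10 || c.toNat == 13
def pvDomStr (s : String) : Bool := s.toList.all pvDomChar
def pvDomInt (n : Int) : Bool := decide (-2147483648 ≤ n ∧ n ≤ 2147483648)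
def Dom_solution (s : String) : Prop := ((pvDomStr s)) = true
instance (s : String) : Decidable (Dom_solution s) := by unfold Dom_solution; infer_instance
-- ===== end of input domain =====

-- B replaces A's single-pass stack elimination by repeated removal of the leftmost
-- adjacent pair of characters whose codes differ by 32 (alternative algorithm, not faster).

-- abs(ord a - ord b) == 32, the pair test both programs use
def pvMatched (a b : Char) : Bool := ((a.toNat : Int) - (b.toNat : Int)).natAbs == 32

-- ===== PORT A =====
-- stack held head-first (Python's append/pop at the end become cons/tail);
-- the final join reverses it back into Python's order.
def pvStep (st : List Char) (c : Char) : List Char :=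
  match st with
  | [] => [c]
  | t :: rest => if pvMatched c t then rest else c :: t :: rest

def solution (s : String) : String :=
  String.mk ((s.toList.foldl pvStep []).reverse)

-- ===== PORT B =====
-- one full left-to-right scan: remove the LEFTMOST adjacent matched pair, `none` if no pair
def pvReduceOnce? (l : List Char) : Option (List Char) :=
  match l with
  | [] => none
  | [_] => none
  | a :: b :: t =>
      if pvMatched a b then some t
      else Option.map (fun m => a :: m) (pvReduceOnce? (b :: t))

-- the removal step shortens the list (termination of B's `while True` loop)
theorem pvReduceOnce?_length : ∀ (l m : List Char), pvReduceOnce? l = some m →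
    m.length < l.length := by
  intro l
  induction l with
  | nil => intro m h; simp [pvReduceOnce?] at h
  | cons a t ih =>
      intro m h
      match t with
      | [] => simp [pvReduceOnce?] at h
      | b :: t =>
          rw [pvReduceOnce?] at h
          split at h
          · cases h; simp
          · rcases Option.map_eq_some_iff.mp h with ⟨m', hm', rfl⟩
            have := ih m' hm'
            simpa using Nat.succ_lt_succ this

def pvLoop (l : List Char) : List Char :=
  match h : pvReduceOnce? l with
  | none => l
  | some m => pvLoop m
termination_by l.length
decreasing_by exact pvReduceOnce?_length _ _ h

def solution_alt (s : String) : String :=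
  String.mk (pvLoop s.toList)

-- ===== PRECONDITION & SPEC =====
def Spec_solution (s : String) (out : String) : Prop := out = solution_alt s
instance (s : String) (out : String) : Decidable (Spec_solution s out) := by unfold Spec_solution; infer_instance

-- ===== CLAIM (what is proved, stated in full; the proofs are below) =====
def Claim_equal_solution : Prop := ∀ (s : String), Dom_solution s → Spec_solution s (solution s)

-- ===== LEMMAS AND PROOFS =====

theorem pvMatched_comm (a b : Char) : pvMatched a b = pvMatched b a := by
  have : ((a.toNat : Int) - b.toNat).natAbs = ((b.toNat : Int) - a.toNat).natAbs := by omega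
  simp [pvMatched, this]

theorem pvReduceOnce?_none_cons {a b : Char} {t : List Char}
    (h : pvReduceOnce? (a :: b :: t) = none) :
    pvMatched a b = false ∧ pvReduceOnce? (b :: t) = none := by
  rw [pvReduceOnce?] at h
  split at h
  · exact absurd h (by simp)
  · refine ⟨by simpa using ‹¬ pvMatched a b = true›, ?_⟩
    simpa using h

-- if the new char does not pair with the stack top, the step is a push
theorem pvStep_push (st : List Char) (a : Char)
    (h : ∀ x, st.head? = some x → pvMatched a x = false) :
    pvStep st a = a :: st := by
  cases st with
  | nil => rfl
  | cons x r => simp [pvStep, h x rfl]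

-- on an irreducible suffix the stack only grows
theorem pvRun_irred : ∀ (l : List Char) (a : Char) (st : List Char),
    pvReduceOnce? (a :: l) = none →
    List.foldl pvStep (a :: st) l = l.reverse ++ (a :: st) := by
  intro l
  induction l with
  | nil => intro a st _; rfl
  | cons c l ih =>
      intro a st h
      obtain ⟨hm, hrest⟩ := pvReduceOnce?_none_cons h
      have hpush : pvStep (a :: st) c = c :: a :: st := by
        apply pvStep_push
        intro x hx
        simp at hx
        subst hx
        rw [pvMatched_comm]; exact hm
      simp only [List.foldl_cons, hpush]
      rw [ih c (a :: st) hrest]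
      simp

theorem pvIrred_full (l : List Char) (h : pvReduceOnce? l = none) :
    List.foldl pvStep [] l = l.reverse := by
  cases l with
  | nil => rfl
  | cons a l =>
      have : pvStep [] a = a :: ([] : List Char) := rfl
      simp only [List.foldl_cons, this]
      rw [pvRun_irred l a [] h]
      simp

-- removing the LEFTMOST pair does not change the stack run
theorem pvRun_step : ∀ (l m st : List Char), pvReduceOnce? l = some m →
    (∀ a b, st.head? = some a → l.head? = some b → pvMatched b a = false) →
    List.foldl pvStep st l = List.foldl pvStep st m := by
  intro l
  induction l with
  | nil => intro m st h _; simp [pvReduceOnce?] at h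
  | cons a t ih =>
      intro m st h hhd
      match t with
      | [] => simp [pvReduceOnce?] at h
      | b :: t =>
          have hpushA : pvStep st a = a :: st := by
            apply pvStep_push
            intro x hx
            exact hhd x a hx rfl
          rw [pvReduceOnce?] at h
          split at h
          · -- leftmost pair is (a, b): push a, then b pops it
            cases h
            have hpop : pvStep (a :: st) b = st := by
              simp [pvStep, pvMatched_comm b a, ‹pvMatched a b = true›]
            simp only [List.foldl_cons, hpushA, hpop]
          · rcases Option.map_eq_some_iff.mp h with ⟨m', hm', rfl⟩
            have hab : pvMatched a b = false := by simpa using ‹¬ pvMatched a b = true›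
            have := ih m' (a :: st) hm' (by
              intro x y hx hy
              simp at hx hy
              subst hx; subst hy
              rw [pvMatched_comm]; exact hab)
            simp only [List.foldl_cons, hpushA]
            exact this

theorem pvMain (l : List Char) : (List.foldl pvStep [] l).reverse = pvLoop l := by
  induction l using pvLoop.induct with
  | case1 l h =>
      rw [pvIrred_full l h, List.reverse_reverse, pvLoop]
      split
      · rfl
      · rename_i m hm
        rw [h] at hm
        cases hm
  | case2 l m h ih =>
      rw [pvLoop]
      split
      · rename_i hm
        rw [h] at hm
        cases hm
      · rename_i m' hm
        rw [h] at hm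
        cases hm
        rw [pvRun_step l m [] h (by intro a b ha; simp at ha), ih]

-- ===== VERDICT (by name: the statement is the Claim_ definition above) =====
theorem solution_spec : Claim_equal_solution := by
  intro s _
  unfold Spec_solution solution solution_alt
  rw [pvMain]
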